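-- pv_equiv track=rewrite | github.com/nourabulnasr/GP-Legal-AI- | model_ML/egypt_labor_compliance.py | _line_offsets
-- ===== SOURCE A (Python) =====
-- from typing import Dict, List, Optional, Tuple
--
-- def _line_offsets(text: str) -> List[Tuple[int, int, str]]:
--     """
--     Returns list of (start, end, line_text) for each line.
--     Offsets refer to indices in `text`. We include newline in end offsets when present.
--     """
--     lines: List[Tuple[int, int, str]] = []
--     i = 0
--     n = len(text)
--     while i < n:
--         j = text.find("\n", i)
--         if j == -1:
--             j = n
--             line = text[i:j]
--             lines.append((i, j, line))
--             break
--         line = text[i:j]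
--         lines.append((i, j + 1, line))
--         i = j + 1
--     return lines
-- ===== SOURCE B (Python) =====
-- def _line_offsets(text):
--     """
--     Single left-to-right pass: accumulate the current line's characters and a
--     running start offset instead of repeated find() scans and slicing.
--     """
--     lines = []
--     start = 0
--     cur = []
--     for idx, ch in enumerate(text):
--         if ch == "\n":
--             lines.append((start, idx + 1, "".join(cur)))
--             cur = []
--             start = idx + 1
--         else:
--             cur.append(ch)
--     if cur:
--         lines.append((start, start + len(cur), "".join(cur)))
--     return lines
-- ===== Notes on version B (the rewrite author's own statement) =====
-- stated objective: alternative
-- what changed: Replaces A's repeated str.find scans for the next newline plus slicing with a single enumerate() pass that accumulates the current line's characters and a running start offset, emitting each line when a newline is consumed and flushing a non-empty trailing line at the end.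
import Mathlib
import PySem

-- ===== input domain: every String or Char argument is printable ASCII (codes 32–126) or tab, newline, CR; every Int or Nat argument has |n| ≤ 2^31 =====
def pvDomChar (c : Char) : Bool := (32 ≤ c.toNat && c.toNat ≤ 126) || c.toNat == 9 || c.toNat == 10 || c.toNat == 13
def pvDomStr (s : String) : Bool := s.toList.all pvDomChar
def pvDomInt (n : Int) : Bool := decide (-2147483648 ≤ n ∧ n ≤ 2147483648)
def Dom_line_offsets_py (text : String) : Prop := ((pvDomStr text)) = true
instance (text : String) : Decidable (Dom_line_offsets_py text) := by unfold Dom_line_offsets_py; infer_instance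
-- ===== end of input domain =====

-- B replaces A's repeated find-next-newline/slice scans by one char-at-a-time pass with a
-- running start offset and an accumulated current line (objective: alternative decomposition).

-- ===== PORT A =====
-- A's while loop: i advances strictly each iteration, so `text.length + 1` fuel always
-- suffices (the fuel only makes the same computation total; proved in the lemmas below).
def lineOffsetsGo (text : String) (n : Int) : Nat → Int → List (Int × Int × String)
  | 0, _ => []
  | fuel + 1, i =>
    if i < n then
      let j := PySem.Str.findFrom text "\n" i
      if j = -1 then
        [(i, n, PySem.Str.slice text (some i) (some n))]
      else
        (i, j + 1, PySem.Str.slice text (some i) (some j)) :: lineOffsetsGo text n fuel (j + 1)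
    else []

def line_offsets_py (text : String) : List (Int × Int × String) :=
  lineOffsetsGo text (PySem.Str.len text) (text.toList.length + 1) 0

-- ===== PORT B =====
def lineOffsetsStep (st : List (Int × Int × String) × List Char × Int)
    (p : Int × Char) : List (Int × Int × String) × List Char × Int :=
  match st with
  | (lines, cur, start) =>
    if p.2 = '\n' then (lines ++ [(start, p.1 + 1, String.ofList cur)], [], p.1 + 1)
    else (lines, cur ++ [p.2], start)

def line_offsets_py_alt (text : String) : List (Int × Int × String) :=
  match (PySem.List.enumerate text.toList).foldl lineOffsetsStep ([], [], 0) with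
  | (lines, cur, start) =>
    if cur = [] then lines else lines ++ [(start, start + cur.length, String.ofList cur)]

-- ===== PRECONDITION & SPEC =====
def Spec_line_offsets_py (text : String) (out : List (Int × Int × String)) : Prop := out = line_offsets_py_alt text
instance (text : String) (out : List (Int × Int × String)) : Decidable (Spec_line_offsets_py text out) := by unfold Spec_line_offsets_py; infer_instance

-- ===== CLAIM (what is proved, stated in full; the proofs are below) =====
def Claim_equal_line_offsets_py : Prop := ∀ (text : String), Dom_line_offsets_py text → Spec_line_offsets_py text (line_offsets_py text)

-- ===== LEMMAS AND PROOFS =====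

/-- Reference line decomposition: lines of `cs` with offsets counted from `start`. -/
def lineSpec (start : Nat) : List Char → List (Int × Int × String)
  | [] => []
  | c :: cs =>
    let line := (c :: cs).takeWhile (· ≠ '\n')
    let rest := (c :: cs).dropWhile (· ≠ '\n')
    if _h : rest = [] then [((start : Int), (start : Int) + line.length, String.ofList line)]
    else ((start : Int), (start : Int) + line.length + 1, String.ofList line) ::
      lineSpec (start + line.length + 1) rest.tail
termination_by cs => cs.length
decreasing_by
  have h3 := List.length_dropWhile_le (fun x => decide (x ≠ '\n')) (c :: cs)
  simp only [List.length_tail, List.length_cons] at h3 ⊢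
  omega

theorem takeWhile_eq_take_of {α : Type} (p : α → Bool) (l : List α) (f : Nat)
    (hf : f < l.length) (hall : ∀ i, (h : i < f) → p (l[i]'(by omega)) = true)
    (hstop : p (l[f]'hf) = false) :
    l.takeWhile p = l.take f ∧ l.dropWhile p = l.drop f := by
  induction l generalizing f with
  | nil => simp at hf
  | cons a t ih =>
    cases f with
    | zero => simp at hstop; simp [List.takeWhile, List.dropWhile, hstop]
    | succ f' =>
      have ha : p a = true := hall 0 (by omega)
      have hf' : f' < t.length := by simp at hf; omega
      have := ih f' hf' (fun i hi => by
          have := hall (i + 1) (by omega)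
          simpa using this)
        (by simpa using hstop)
      simp [List.takeWhile, List.dropWhile, ha, this.1, this.2]

theorem singleton_infix_iff {α : Type} (a : α) (l : List α) : [a] <:+: l ↔ a ∈ l := by
  constructor
  · intro h; exact h.mem (List.mem_singleton_self a)
  · intro h
    obtain ⟨s, t, rfl⟩ := List.append_of_mem h
    exact ⟨s, t, by simp⟩

theorem takeWhile_ne_nl_of_not_mem (cur : List Char) (hnl : '\n' ∉ cur) :
    cur.takeWhile (· ≠ '\n') = cur := by
  apply List.takeWhile_eq_self_iff.mpr
  intro a ha; simp; intro h; exact hnl (h ▸ ha)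

theorem dropWhile_ne_nl_of_not_mem (cur : List Char) (hnl : '\n' ∉ cur) :
    cur.dropWhile (· ≠ '\n') = [] := by
  apply List.dropWhile_eq_nil_iff.mpr
  intro a ha; simp; intro h; exact hnl (h ▸ ha)

/-- A's loop, started at position `k`, produces the reference lines of the suffix. -/
theorem lineOffsetsGo_eq (text : String) :
    ∀ fuel k, k ≤ text.toList.length → text.toList.length - k < fuel →
      lineOffsetsGo text (PySem.Str.len text) fuel (k : Int)
        = lineSpec k (text.toList.drop k) := by
  intro fuel
  induction fuel with
  | zero => intro k hk hfuel; omega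
  | succ fuel ih =>
    intro k hk hfuel
    set cs := text.toList with hcs
    have hn : PySem.Str.len text = (cs.length : Int) := by
      simp [PySem.Str.len_eq, hcs]
    by_cases hlt : k < cs.length
    · have hcond : ((k : Int) < PySem.Str.len text) := by rw [hn]; exact_mod_cast hlt
      have hfind : PySem.Str.findFrom text "\n" (k : Int)
          = if PySem.Chars.find (cs.drop k) ['\n'] = -1 then -1
            else (k : Int) + PySem.Chars.find (cs.drop k) ['\n'] := by
        rw [PySem.Str.findFrom_eq]
        have := PySem.Chars.findFrom_natCast cs "\n".toList k hk
        simpa using this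
      by_cases hneg : PySem.Chars.find (cs.drop k) ['\n'] = -1
      · -- no newline in the remaining suffix
        have hfind' : PySem.Str.findFrom text "\n" (k : Int) = -1 := by
          rw [hfind, if_pos hneg]
        have hnotin : '\n' ∉ cs.drop k := by
          have := (PySem.Chars.find_eq_neg_one_iff (cs.drop k) ['\n']).mp hneg
          intro hmem; exact this ((singleton_infix_iff _ _).mpr hmem)
        have hslice : PySem.Str.slice text (some (k : Int)) (some (PySem.Str.len text))
            = String.ofList (cs.drop k) := by
          apply String.toList_inj.mp
          rw [PySem.Str.toList_slice, PySem.Chars.slice_eq_listSlice, String.toList_ofList]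
          rw [hn]
          have : ((cs.length : Int)) = (k : Int) + ((cs.length - k : Nat) : Int) := by
            omega
          rw [← hcs, this, PySem.List.slice_natCast_add]
          exact List.take_of_length_le (by simp)
        have htw := takeWhile_ne_nl_of_not_mem _ hnotin
        have hdw := dropWhile_ne_nl_of_not_mem _ hnotin
        obtain ⟨c, cs', hd⟩ : ∃ c cs', cs.drop k = c :: cs' := by
          cases hcs' : cs.drop k with
          | nil =>
            exfalso
            have := List.length_drop (l := cs) (i := k)
            rw [hcs'] at this; simp at this; omega
          | cons c cs' => exact ⟨c, cs', rfl⟩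
        rw [lineOffsetsGo]
        rw [if_pos hcond]
        simp only [hfind', reduceIte]
        rw [hd] at htw hdw hslice ⊢
        rw [lineSpec.eq_def]
        simp only [htw, hdw]
        rw [dif_pos trivial]
        have hlen : (cs.length : Int) = (k : Int) + ((c :: cs').length : Int) := by
          have := List.length_drop (l := cs) (i := k)
          rw [hd] at this
          simp only [List.length_cons] at this ⊢
          omega
        rw [hslice, hn, hlen]
      · -- a newline is found at k + f
        have hge : 0 ≤ PySem.Chars.find (cs.drop k) ['\n'] := by
          have := PySem.Chars.neg_one_le_find (cs.drop k) ['\n']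
          omega
        set f := (PySem.Chars.find (cs.drop k) ['\n']).toNat with hfdef
        have hfcast : PySem.Chars.find (cs.drop k) ['\n'] = (f : Int) := by
          rw [hfdef, Int.toNat_of_nonneg hge]
        have hfind' : PySem.Str.findFrom text "\n" (k : Int) = (k : Int) + (f : Int) := by
          rw [hfind, if_neg hneg, hfcast]
        obtain ⟨hpre, hmin⟩ := PySem.Chars.find_spec (s := cs.drop k) (sub := ['\n']) hge
        rw [← hfdef] at hpre hmin
        obtain ⟨tl, htl⟩ := hpre
        have hflen : f < (cs.drop k).length := by
          by_contra hge'
          push Not at hge'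
          rw [List.drop_eq_nil_of_le hge'] at htl
          simp at htl
        have hgetf : (cs.drop k)[f]'hflen = '\n' := by
          have hdc := List.drop_eq_getElem_cons (i := f) (l := cs.drop k) hflen
          rw [hdc, List.singleton_append] at htl
          exact (List.cons_eq_cons.mp htl).1.symm
        have hall : ∀ i, (h : i < f) → (decide (((cs.drop k)[i]'(by omega)) ≠ '\n')) = true := by
          intro i hi
          simp only [decide_eq_true_eq]
          intro heq
          apply hmin i hi
          rw [List.drop_eq_getElem_cons (i := i) (l := cs.drop k) (by omega), heq]
          simp
        have hstop : (decide (((cs.drop k)[f]'hflen) ≠ '\n')) = false := by simp [hgetf]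
        obtain ⟨htw, hdw⟩ := takeWhile_eq_take_of (fun x => decide (x ≠ '\n')) (cs.drop k) f hflen hall hstop
        have hdrop : (cs.drop k).drop f = '\n' :: (cs.drop k).drop (f + 1) := by
          rw [List.drop_eq_getElem_cons (i := f) hflen, hgetf]
        have hslice : PySem.Str.slice text (some (k : Int)) (some ((k : Int) + (f : Int)))
            = String.ofList ((cs.drop k).take f) := by
          apply String.toList_inj.mp
          rw [PySem.Str.toList_slice, PySem.Chars.slice_eq_listSlice, String.toList_ofList, ← hcs,
            PySem.List.slice_natCast_add]
        have ihres := ih (k + f + 1)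
          (by have := List.length_drop (l := cs) (i := k); omega)
          (by omega)
        have hdd : cs.drop (k + f + 1) = (cs.drop k).drop (f + 1) := by
          rw [List.drop_drop]; ring_nf
        obtain ⟨c, cs', hd⟩ : ∃ c cs', cs.drop k = c :: cs' := by
          cases hcs' : cs.drop k with
          | nil => rw [hcs'] at hflen; simp at hflen
          | cons c cs' => exact ⟨c, cs', rfl⟩
        have hlen : ((c :: cs').take f).length = f := by
          rw [List.length_take]
          rw [hd] at hflen
          omega
        rw [hd] at htw hdw hdrop hslice hdd ⊢
        conv_rhs => rw [lineSpec.eq_def]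
        simp only [htw, hdw, hdrop]
        rw [dif_neg (by simp)]
        simp only [List.tail_cons, hlen]
        rw [lineOffsetsGo]
        rw [if_pos hcond]
        have hfne : ¬(PySem.Str.findFrom text "\n" (k : Int) = -1) := by
          rw [hfind']; omega
        simp only [hfind']
        have hj1 : (k : Int) + (f : Int) + 1 = ((k + f + 1 : Nat) : Int) := by push_cast; ring
        rw [hj1, ihres, hdd, hslice]
        rw [show ((k + f + 1 : Nat) : Int) = (k : Int) + (f : Int) + 1 from by push_cast; ring]
        rw [if_neg (show ¬((k : Int) + (f : Int) = -1) from by omega)]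
    · -- loop did not run another iteration: k = length
      have hke : k = cs.length := by omega
      have hcond : ¬((k : Int) < PySem.Str.len text) := by rw [hn, hke]; omega
      rw [lineOffsetsGo, if_neg hcond, hke, List.drop_length, lineSpec.eq_def]

/-- Finalization of B's fold state (the trailing `if` of B). -/
def finalizeB (st : List (Int × Int × String) × List Char × Int) : List (Int × Int × String) :=
  match st with
  | (l, c, s) => if c = [] then l else l ++ [(s, s + c.length, String.ofList c)]

/-- B's fold, run from an arbitrary consistent state, appends the reference lines. -/
theorem foldB (cs : List Char) :
    ∀ (lines : List (Int × Int × String)) (cur : List Char) (start : Nat), '\n' ∉ cur →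
      finalizeB ((PySem.List.enumerate cs ((start + cur.length : Nat) : Int)).foldl
          lineOffsetsStep (lines, cur, (start : Int)))
        = lines ++ lineSpec start (cur ++ cs) := by
  induction cs with
  | nil =>
    intro lines cur start hnl
    cases cur with
    | nil =>
      simp only [PySem.List.enumerate, List.foldl_nil, List.append_nil]
      rw [lineSpec.eq_def]
      simp [finalizeB]
    | cons a t =>
      have htw := takeWhile_ne_nl_of_not_mem _ hnl
      have hdw := dropWhile_ne_nl_of_not_mem _ hnl
      simp only [PySem.List.enumerate, List.foldl_nil, List.append_nil]
      rw [lineSpec.eq_def]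
      simp only [htw, hdw]
      rw [dif_pos trivial]
      simp [finalizeB]
  | cons c cs ih =>
    intro lines cur start hnl
    rw [show PySem.List.enumerate (c :: cs) ((start + cur.length : Nat) : Int)
        = (((start + cur.length : Nat) : Int), c) ::
            PySem.List.enumerate cs (((start + cur.length : Nat) : Int) + 1) from by
      simp [PySem.List.enumerate]]
    have hcast : (((start + cur.length : Nat) : Int) + 1) = ((start + cur.length + 1 : Nat) : Int) := by
      push_cast; ring
    by_cases hc : c = '\n'
    · subst hc
      rw [List.foldl_cons]
      have hstep : lineOffsetsStep (lines, cur, (start : Int)) (((start + cur.length : Nat) : Int), '\n')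
          = (lines ++ [((start : Int), ((start + cur.length + 1 : Nat) : Int), String.ofList cur)],
             [], ((start + cur.length + 1 : Nat) : Int)) := by
        simp [lineOffsetsStep]
      rw [hstep, hcast]
      have hih := ih (lines ++ [((start : Int), ((start + cur.length + 1 : Nat) : Int), String.ofList cur)])
        [] (start + cur.length + 1) (by simp)
      simp only [List.length_nil, Nat.add_zero, List.nil_append] at hih
      rw [hih]
      have htw' := takeWhile_ne_nl_of_not_mem _ hnl
      have hdw' := dropWhile_ne_nl_of_not_mem _ hnl
      have htw : (cur ++ '\n' :: cs).takeWhile (· ≠ '\n') = cur := by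
        rw [List.takeWhile_append, htw', if_pos rfl]
        simp
      have hdw : (cur ++ '\n' :: cs).dropWhile (· ≠ '\n') = '\n' :: cs := by
        rw [List.dropWhile_append, hdw']
        simp
      obtain ⟨a, t, hat⟩ : ∃ a t, cur ++ '\n' :: cs = a :: t := by
        cases h : cur ++ '\n' :: cs with
        | nil => simp at h
        | cons a t => exact ⟨a, t, rfl⟩
      rw [hat] at htw hdw ⊢
      conv_rhs => rw [lineSpec.eq_def]
      simp only [htw, hdw]
      rw [dif_neg (by simp)]
      simp only [List.tail_cons, List.append_assoc]
      rw [show ((start + cur.length + 1 : Nat) : Int) = (start : Int) + (cur.length : Int) + 1 from by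
        push_cast; ring]
      simp
    · rw [List.foldl_cons]
      have hstep : lineOffsetsStep (lines, cur, (start : Int)) (((start + cur.length : Nat) : Int), c)
          = (lines, cur ++ [c], (start : Int)) := by
        simp [lineOffsetsStep, hc]
      rw [hstep, hcast]
      have hnl' : '\n' ∉ cur ++ [c] := by
        intro h
        rcases List.mem_append.mp h with h' | h'
        · exact hnl h'
        · simp at h'; exact hc h'.symm
      have hih := ih lines (cur ++ [c]) start hnl'
      rw [show start + cur.length + 1 = start + (cur ++ [c]).length from by simp; omega] at *
      rw [hih, List.append_assoc]
      simp

-- ===== VERDICT (by name: the statement is the Claim_ definition above) =====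
theorem line_offsets_py_spec : Claim_equal_line_offsets_py := by
  unfold Claim_equal_line_offsets_py
  intro text _
  unfold Spec_line_offsets_py
  have hA : line_offsets_py text = lineSpec 0 text.toList := by
    unfold line_offsets_py
    have := lineOffsetsGo_eq text (text.toList.length + 1) 0 (by omega) (by omega)
    simpa using this
  have hB : line_offsets_py_alt text = lineSpec 0 text.toList := by
    have h0 : line_offsets_py_alt text
        = finalizeB ((PySem.List.enumerate text.toList 0).foldl lineOffsetsStep ([], [], 0)) := rfl
    have := foldB text.toList [] [] 0 (by simp)
    simp only [List.length_nil, Nat.add_zero, Nat.cast_zero, List.nil_append] at this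
    rw [h0, this]
  rw [hA, hB]
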